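-- pv_equiv track=rewrite | github.com/zhutao100/mlx-omni-server | src/mlx_omni_server/chat/mlx/stop_tokens_checker.py | _find_prefix_length
-- ===== SOURCE A (Python) =====
-- from typing import List, NamedTuple, Optional, Union
--
-- def _find_prefix_length(tokens: List[int], first_stop_token: int) -> int:
--     """Find length of matching prefix tokens.
--
--     Args:
--         tokens: Token sequence to check
--         first_stop_token: First token of stop sequence
--
--     Returns:
--         Length of matching prefix
--     """
--     prefix_len = 0
--     for i in range(len(tokens) - 1, -1, -1):
--         if tokens[i] == first_stop_token:
--             prefix_len += 1
--         else:
--             break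
--     return prefix_len
-- ===== SOURCE B (Python) =====
-- from typing import List
--
-- def _find_prefix_length(tokens: List[int], first_stop_token: int) -> int:
--     """Length of the final consecutive run of tokens equal to first_stop_token,
--     computed in a single forward pass with reset-on-mismatch."""
--     count = 0
--     for token in tokens:
--         if token == first_stop_token:
--             count += 1
--         else:
--             count = 0
--     return count
-- ===== Notes on version B (the rewrite author's own statement) =====
-- stated objective: alternative
-- what changed: Replaced the backward index loop with break by a single forward pass that increments a counter on a match and resets it to 0 on any mismatch.
import Mathlib
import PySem

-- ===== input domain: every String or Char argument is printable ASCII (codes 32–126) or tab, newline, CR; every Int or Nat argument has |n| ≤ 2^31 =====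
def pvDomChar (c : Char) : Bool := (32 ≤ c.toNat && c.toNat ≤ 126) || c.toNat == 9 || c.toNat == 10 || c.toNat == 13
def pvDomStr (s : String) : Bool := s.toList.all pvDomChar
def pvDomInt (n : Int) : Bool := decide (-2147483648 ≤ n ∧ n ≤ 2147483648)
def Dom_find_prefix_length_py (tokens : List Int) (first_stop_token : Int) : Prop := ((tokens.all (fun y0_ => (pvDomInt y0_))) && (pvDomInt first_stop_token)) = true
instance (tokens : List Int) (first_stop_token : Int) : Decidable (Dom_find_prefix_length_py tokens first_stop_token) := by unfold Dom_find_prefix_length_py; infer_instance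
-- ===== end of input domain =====

-- ===== PORT A =====
-- Backward loop of A: walk the reversed list, count while equal, break at first mismatch.
def pvGoA (s : Int) : List Int → Int
  | [] => 0
  | t :: rest => if t = s then 1 + pvGoA s rest else 0

def find_prefix_length_py (tokens : List Int) (first_stop_token : Int) : Int :=
  pvGoA first_stop_token tokens.reverse

-- ===== PORT B =====
-- B: one forward pass, increment on match, reset to 0 on mismatch.
def find_prefix_length_py_alt (tokens : List Int) (first_stop_token : Int) : Int :=
  tokens.foldl (fun c t => if t = first_stop_token then c + 1 else 0) 0

-- ===== PRECONDITION & SPEC =====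
def Spec_find_prefix_length_py (tokens : List Int) (first_stop_token : Int) (out : Int) : Prop := out = find_prefix_length_py_alt tokens first_stop_token
instance (tokens : List Int) (first_stop_token : Int) (out : Int) : Decidable (Spec_find_prefix_length_py tokens first_stop_token out) := by unfold Spec_find_prefix_length_py; infer_instance

-- ===== CLAIM (what is proved, stated in full; the proofs are below) =====
def Claim_equal_find_prefix_length_py : Prop := ∀ (tokens : List Int) (first_stop_token : Int), Dom_find_prefix_length_py tokens first_stop_token → Spec_find_prefix_length_py tokens first_stop_token (find_prefix_length_py tokens first_stop_token)

-- ===== LEMMAS AND PROOFS =====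

-- ===== VERDICT (by name: the statement is the Claim_ definition above) =====
theorem pv_rev_eq_foldl (s : Int) (l : List Int) :
    pvGoA s l.reverse = l.foldl (fun c t => if t = s then c + 1 else 0) 0 := by
  induction l using List.reverseRecOn with
  | nil => rfl
  | append_singleton l t ih =>
      simp [List.foldl_append, pvGoA, ih]
      split <;> omega

theorem find_prefix_length_py_spec : Claim_equal_find_prefix_length_py := by
  intro tokens s _
  unfold Spec_find_prefix_length_py find_prefix_length_py find_prefix_length_py_alt
  exact pv_rev_eq_foldl s tokens
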